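-- pv_equiv track=rewrite | github.com/D2IP-TUB/multi-table-error-correction | datasets/unionable_tables/support_material/scripts/create_partitioned_base.py | partition_indices
-- ===== SOURCE A (Python) =====
-- def partition_indices(n_rows, k):
--     """Return k contiguous index ranges (start, end) for n_rows. Last partition may be smaller."""
--     if k <= 0 or n_rows <= 0:
--         return []
--     base_size = n_rows // k
--     remainder = n_rows % k
--     ranges = []
--     start = 0
--     for i in range(k):
--         size = base_size + (1 if i < remainder else 0)
--         end = start + size
--         ranges.append((start, end))
--         start = end
--     return ranges
-- ===== SOURCE B (Python) =====
-- def partition_indices(n_rows, k):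
--     """Return k contiguous index ranges (start, end) for n_rows. Last partition may be smaller."""
--     if k <= 0 or n_rows <= 0:
--         return []
--     base_size = n_rows // k
--     remainder = n_rows % k
--
--     def bound(i):
--         return i * base_size + min(i, remainder)
--
--     return [(bound(i), bound(i + 1)) for i in range(k)]
-- ===== Notes on version B (the rewrite author's own statement) =====
-- stated objective: alternative
-- what changed: Replaced the sequential running-start accumulator with a closed-form boundary function bound(i) = i*base_size + min(i, remainder), computing each (start, end) pair directly from its index.
import Mathlib
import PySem

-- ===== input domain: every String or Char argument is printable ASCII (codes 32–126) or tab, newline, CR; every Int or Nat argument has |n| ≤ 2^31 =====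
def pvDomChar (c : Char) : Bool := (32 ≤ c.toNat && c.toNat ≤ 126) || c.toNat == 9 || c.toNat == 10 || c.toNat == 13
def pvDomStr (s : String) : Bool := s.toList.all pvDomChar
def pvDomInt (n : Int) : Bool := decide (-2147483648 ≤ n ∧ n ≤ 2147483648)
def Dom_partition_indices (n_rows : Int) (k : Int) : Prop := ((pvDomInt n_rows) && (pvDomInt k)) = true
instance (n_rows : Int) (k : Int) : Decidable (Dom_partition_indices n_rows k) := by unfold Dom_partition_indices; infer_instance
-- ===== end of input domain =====

-- B replaces A's running-start accumulator with a closed-form boundary formula (same cost, different decomposition).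
-- ===== PORT A =====
def partition_indices (n_rows : Int) (k : Int) : List (Int × Int) :=
  if k ≤ 0 ∨ n_rows ≤ 0 then []
  else
    let base_size := PySem.Int.floordiv n_rows k
    let remainder := PySem.Int.mod n_rows k
    let st := (PySem.List.pyRange 0 k 1).foldl
      (fun (st : List (Int × Int) × Int) i =>
        let size := base_size + (if i < remainder then 1 else 0)
        let e := st.2 + size
        (st.1 ++ [(st.2, e)], e)) ([], 0)
    st.1

-- ===== PORT B =====
-- bound(i) = i * base_size + min(i, remainder)
def piBound (base_size : Int) (remainder : Int) (i : Int) : Int :=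
  i * base_size + min i remainder

def partition_indices_alt (n_rows : Int) (k : Int) : List (Int × Int) :=
  if k ≤ 0 ∨ n_rows ≤ 0 then []
  else
    let base_size := PySem.Int.floordiv n_rows k
    let remainder := PySem.Int.mod n_rows k
    (PySem.List.pyRange 0 k 1).map
      (fun i => (piBound base_size remainder i, piBound base_size remainder (i+1)))

-- ===== PRECONDITION & SPEC =====
def Spec_partition_indices (n_rows : Int) (k : Int) (out : List (Int × Int)) : Prop := out = partition_indices_alt n_rows k
instance (n_rows : Int) (k : Int) (out : List (Int × Int)) : Decidable (Spec_partition_indices n_rows k out) := by unfold Spec_partition_indices; infer_instance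

-- ===== CLAIM (what is proved, stated in full; the proofs are below) =====
def Claim_equal_partition_indices : Prop := ∀ (n_rows : Int) (k : Int), Dom_partition_indices n_rows k → Spec_partition_indices n_rows k (partition_indices n_rows k)

-- ===== LEMMAS AND PROOFS =====

lemma fold_segment (base rem k : Int) :
    ∀ (n : Nat) (a : Int), 0 ≤ a → (k - a).toNat = n → ∀ (acc : List (Int × Int)),
    (PySem.List.pyRange a k 1).foldl
      (fun (st : List (Int × Int) × Int) i =>
        let size := base + (if i < rem then 1 else 0)
        let e := st.2 + size
        (st.1 ++ [(st.2, e)], e)) (acc, piBound base rem a)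
    = (acc ++ (PySem.List.pyRange a k 1).map
        (fun i => (piBound base rem i, piBound base rem (i+1))),
       piBound base rem (max a k)) := by
  intro n
  induction n with
  | zero =>
    intro a ha hn acc
    have hk : k ≤ a := by omega
    rw [PySem.List.pyRange_one_eq_nil hk]
    simp [max_eq_left hk]
  | succ m ih =>
    intro a ha hn acc
    have hak : a < k := by omega
    rw [PySem.List.pyRange_one_cons hak]
    simp only [List.foldl_cons, List.map_cons]
    have hstep : piBound base rem a + (base + (if a < rem then 1 else 0))
        = piBound base rem (a+1) := by
      simp only [piBound, Int.min_def, add_mul, one_mul]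
      split_ifs <;> omega
    rw [hstep]
    have := ih (a+1) (by omega) (by omega) (acc ++ [(piBound base rem a, piBound base rem (a+1))])
    simp only at this ⊢
    rw [this]
    have hmax1 : max (a+1) k = k := by omega
    have hmax2 : max a k = k := by omega
    simp [hmax1, hmax2]

-- ===== VERDICT (by name: the statement is the Claim_ definition above) =====
theorem partition_indices_spec : Claim_equal_partition_indices := by
  intro n_rows k _
  unfold Spec_partition_indices partition_indices partition_indices_alt
  split
  · rfl
  · rename_i h
    have hk : 0 < k := by omega
    have hrem : 0 ≤ PySem.Int.mod n_rows k := PySem.Int.mod_nonneg _ hk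
    have hb0 : piBound (PySem.Int.floordiv n_rows k) (PySem.Int.mod n_rows k) 0 = 0 := by
      simp [piBound, min_eq_left hrem]
    have := fold_segment (PySem.Int.floordiv n_rows k) (PySem.Int.mod n_rows k) k
      (k - 0).toNat 0 le_rfl rfl []
    rw [hb0] at this
    simp only at this ⊢
    rw [this]
    simp
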